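-- pv_equiv track=rewrite | github.com/furkanaygur/Codewars-Examples | TripleX.py | triple_x
-- ===== SOURCE A (Python) =====
-- def triple_x(s):
--     firstX = False
--     xCounter = 0
--     for i in s:
--         if i == 'x':
--             if not firstX:
--                 firstX = True
--                 xCounter += 1
--             elif firstX:
--                 xCounter += 1
--         else:
--             if xCounter >= 1:
--                 break
--
--     if xCounter>2:
--         return True
--     return False
-- ===== SOURCE B (Python) =====
-- def triple_x(s):
--     k = s.find('xxx')
--     return k != -1 and k == s.find('x')
-- ===== Notes on version B (the rewrite author's own statement) =====
-- stated objective: idiomatic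
-- what changed: Replaces A's stateful char-by-char flag+counter loop with two builtin substring searches, returning whether the first occurrence of 'xxx' exists and coincides with the first occurrence of 'x' (i.e. the first run of x's exceeds 2).
import Mathlib
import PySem

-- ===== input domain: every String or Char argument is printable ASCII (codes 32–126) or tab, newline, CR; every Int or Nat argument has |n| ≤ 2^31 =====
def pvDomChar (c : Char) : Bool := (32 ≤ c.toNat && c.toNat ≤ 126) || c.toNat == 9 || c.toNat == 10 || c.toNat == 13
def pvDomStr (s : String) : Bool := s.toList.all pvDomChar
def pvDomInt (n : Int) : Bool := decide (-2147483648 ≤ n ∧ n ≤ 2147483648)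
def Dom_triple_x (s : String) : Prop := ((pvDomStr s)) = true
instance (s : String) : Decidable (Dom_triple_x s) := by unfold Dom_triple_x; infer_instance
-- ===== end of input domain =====

-- B replaces A's stateful flag+counter+break character loop by two builtin
-- substring searches: the first run of 'x' exceeds 2 iff the first occurrence
-- of "xxx" exists and coincides with the first occurrence of "x"; objective: idiomatic.

-- ===== PORT A =====
-- A's for-loop with `break`, state (firstX, xCounter); returns xCounter after the loop.
def tripleXLoopA : List Char → Bool → Int → Int
  | [], _, c => c
  | i :: rest, firstX, c =>
    if i = 'x' then
      -- both the `not firstX` and `firstX` branches increment the counter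
      (if ¬ firstX then tripleXLoopA rest true (c + 1)
       else tripleXLoopA rest firstX (c + 1))
    else
      if c ≥ 1 then c  -- break
      else tripleXLoopA rest firstX c

def triple_x (s : String) : Bool :=
  decide (tripleXLoopA s.toList false 0 > 2)

-- ===== PORT B =====
def triple_x_alt (s : String) : Bool :=
  let k := PySem.Str.find s "xxx"
  decide (k ≠ -1 ∧ k = PySem.Str.find s "x")

-- ===== PRECONDITION & SPEC =====
def Spec_triple_x (s : String) (out : Bool) : Prop := out = triple_x_alt s
instance (s : String) (out : Bool) : Decidable (Spec_triple_x s out) := by unfold Spec_triple_x; infer_instance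

-- ===== CLAIM (what is proved, stated in full; the proofs are below) =====
def Claim_equal_triple_x : Prop := ∀ (s : String), Dom_triple_x s → Spec_triple_x s (triple_x s)

-- ===== LEMMAS AND PROOFS =====

-- A's loop once the counter is positive: it adds the length of the current run of 'x'.
theorem tripleXLoopA_pos (l : List Char) (fx : Bool) (c : Int) (hc : 1 ≤ c) :
    tripleXLoopA l fx c = c + ((l.takeWhile (fun ch => ch = 'x')).length : Int) := by
  induction l generalizing fx c with
  | nil => simp [tripleXLoopA]
  | cons a rest ih =>
    by_cases ha : a = 'x'
    · subst ha
      have hrec := ih true (c + 1) (by omega)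
      by_cases hfx : fx = true <;>
        simp [tripleXLoopA, hfx, List.takeWhile, hrec] <;> omega
    · simp [tripleXLoopA, ha, List.takeWhile, hc]

-- A's loop from counter 0: the result is the length of the first run of 'x'.
theorem tripleXLoopA_zero (l : List Char) (fx : Bool) :
    tripleXLoopA l fx 0 =
      (((l.dropWhile (fun ch => ch ≠ 'x')).takeWhile (fun ch => ch = 'x')).length : Int) := by
  induction l generalizing fx with
  | nil => simp [tripleXLoopA]
  | cons a rest ih =>
    by_cases ha : a = 'x'
    · subst ha
      by_cases hfx : fx = true <;>
        simp [tripleXLoopA, hfx, List.dropWhile,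
          tripleXLoopA_pos rest _ 1 (by omega)] <;> omega
    · simp [tripleXLoopA, ha, List.dropWhile, ih]

-- dropping the leading non-matching prefix is dropWhile
theorem drop_length_takeWhile (p : Char → Bool) (l : List Char) :
    l.drop (l.takeWhile p).length = l.dropWhile p := by
  induction l with
  | nil => simp
  | cons a rest ih =>
    by_cases ha : p a = true <;> simp [List.takeWhile, List.dropWhile, ha, ih]

-- find equals k when an occurrence starts at k and none starts earlier
theorem find_unique (l sub : List Char) (k : Nat)
    (h1 : sub <+: l.drop k) (h2 : ∀ i < k, ¬ sub <+: l.drop i) :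
    PySem.Chars.find l sub = (k : Int) := by
  have hinfix : sub <:+: l := h1.isInfix.trans (List.drop_suffix k l).isInfix
  have hnn : 0 ≤ PySem.Chars.find l sub := (PySem.Chars.find_nonneg_iff l sub).mpr hinfix
  obtain ⟨hp, hmin⟩ := PySem.Chars.find_spec hnn
  have ht : (PySem.Chars.find l sub).toNat = k := by
    rcases Nat.lt_trichotomy (PySem.Chars.find l sub).toNat k with h | h | h
    · exact absurd hp (h2 _ h)
    · exact h
    · exact absurd h1 (hmin _ h)
  omega

-- a cons-prefix forces the head at that index
theorem head_of_prefix_drop (l t : List Char) (a : Char) (i : Nat)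
    (h : (a :: t) <+: l.drop i) : l[i]? = some a := by
  obtain ⟨r, hr⟩ := h
  have : (l.drop i).head? = some a := by rw [← hr]; rfl
  rwa [List.head?_drop] at this

-- no 'x' strictly before the length of the leading non-'x' prefix
theorem no_x_before (l : List Char) (i : Nat)
    (hi : i < (l.takeWhile (fun ch => ch ≠ 'x')).length) : l[i]? ≠ some 'x' := by
  have hpre := List.takeWhile_prefix (l := l) (p := fun ch => decide (ch ≠ 'x'))
  intro hx
  have hget : l[i]? = (l.takeWhile (fun ch => ch ≠ 'x'))[i]? := by
    obtain ⟨r, hr⟩ := hpre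
    conv_lhs => rw [← hr]
    rw [List.getElem?_append_left hi]
  rw [hget] at hx
  have hmem : 'x' ∈ l.takeWhile (fun ch => ch ≠ 'x') := by
    exact List.mem_of_getElem? hx
  have := List.mem_takeWhile_imp hmem
  simp at this

-- a first run of 'x' longer than 2 means the list starts with "xxx"
theorem prefix_xxx_of_run (d : List Char)
    (h : 2 < (d.takeWhile (fun ch => ch = 'x')).length) :
    ('x' :: 'x' :: 'x' :: []) <+: d := by
  match d with
  | [] => simp [List.takeWhile] at h
  | [a] =>
    by_cases ha : a = 'x' <;> simp [List.takeWhile, ha] at h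
  | [a, b] =>
    by_cases ha : a = 'x' <;> by_cases hb : b = 'x' <;>
      simp [List.takeWhile, ha, hb] at h
  | a :: b :: c :: r =>
    by_cases ha : a = 'x' <;> by_cases hb : b = 'x' <;> by_cases hc : c = 'x' <;>
      simp [List.takeWhile, ha, hb, hc] at h ⊢

-- the first element surviving dropWhile falsifies the predicate
theorem dropWhile_head_not (p : Char → Bool) (l : List Char) (a : Char) (r : List Char)
    (h : l.dropWhile p = a :: r) : p a = false := by
  induction l with
  | nil => simp at h
  | cons b t ih =>
    by_cases hb : p b = true
    · rw [List.dropWhile_cons_of_pos hb] at h; exact ih h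
    · rw [List.dropWhile_cons_of_neg hb] at h
      have hba : b = a := (List.cons_eq_cons.mp h).1
      rw [← hba]
      simpa using hb

-- ===== VERDICT (by name: the statement is the Claim_ definition above) =====
theorem triple_x_spec : Claim_equal_triple_x := by
  intro s _
  unfold Spec_triple_x triple_x triple_x_alt
  simp only [PySem.Str.find_eq]
  set l := s.toList with hl
  have hA := tripleXLoopA_zero l false
  set m := (l.takeWhile (fun ch => ch ≠ 'x')).length with hm
  have hdrop : l.drop m = l.dropWhile (fun ch => ch ≠ 'x') := drop_length_takeWhile _ l
  rw [hA, decide_eq_decide]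
  constructor
  · -- first run longer than 2 ⇒ find "xxx" = find "x" = m ≠ -1
    intro hrun
    -- the first three characters after position m are 'x'
    have hxxx : ('x' :: 'x' :: 'x' :: []) <+: l.drop m := by
      rw [hdrop]
      exact prefix_xxx_of_run _ (by exact_mod_cast hrun)
    have hnone : ∀ i < m, ¬ ('x' :: 'x' :: 'x' :: []) <+: l.drop i := by
      intro i hi h
      exact no_x_before l i hi (head_of_prefix_drop l _ 'x' i h)
    have hnone1 : ∀ i < m, ¬ ('x' :: []) <+: l.drop i := by
      intro i hi h
      exact no_x_before l i hi (head_of_prefix_drop l _ 'x' i h)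
    have hx1 : ('x' :: []) <+: l.drop m := by
      obtain ⟨r, hr⟩ := hxxx
      exact ⟨'x' :: 'x' :: r, by rw [← hr]; rfl⟩
    have e3 := find_unique l _ m hxxx hnone
    have e1 := find_unique l _ m hx1 hnone1
    have hstr3 : ("xxx" : String).toList = ('x' :: 'x' :: 'x' :: []) := rfl
    have hstr1 : ("x" : String).toList = ('x' :: []) := rfl
    rw [hstr3, hstr1, e3, e1]
    exact ⟨by omega, rfl⟩
  · -- find "xxx" = find "x" ≠ -1 ⇒ the first run at m is at least 3 long
    rintro ⟨hne, heq⟩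
    have hstr3 : ("xxx" : String).toList = ('x' :: 'x' :: 'x' :: []) := rfl
    have hstr1 : ("x" : String).toList = ('x' :: []) := rfl
    rw [hstr3] at hne heq; rw [hstr1] at heq
    rw [← hl] at hne heq
    have hnn : 0 ≤ PySem.Chars.find l ('x' :: 'x' :: 'x' :: []) := by
      have := PySem.Chars.neg_one_le_find l ('x' :: 'x' :: 'x' :: [])
      omega
    obtain ⟨hp3, hmin3⟩ := PySem.Chars.find_spec hnn
    set t := (PySem.Chars.find l ('x' :: 'x' :: 'x' :: [])).toNat with htd
    -- t ≥ m : position t carries an 'x', positions < m do not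
    have htm : m ≤ t := by
      by_contra h
      exact no_x_before l t (by omega) (head_of_prefix_drop l _ 'x' t hp3)
    -- t ≤ m : "x" occurs at m (run nonempty?) — from heq, find "x" has the same toNat t
    have htm' : t ≤ m := by
      have hnn1 : 0 ≤ PySem.Chars.find l ('x' :: []) := by rw [← heq]; exact hnn
      obtain ⟨hp1, hmin1⟩ := PySem.Chars.find_spec hnn1
      have ht1 : (PySem.Chars.find l ('x' :: [])).toNat = t := by rw [← heq]
      by_contra h
      -- then m < t; but 'x' occurs at position m, contradicting minimality of find "x"
      have hx_at_m : ('x' :: []) <+: l.drop m := by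
        rw [hdrop]
        have hlt : t < l.length := by
          have h3 := hp3.length_le
          simp at h3
          omega
        have hne' : l.dropWhile (fun ch => ch ≠ 'x') ≠ [] := by
          rw [← hdrop]
          intro hnil
          have := List.drop_eq_nil_iff.mp hnil
          omega
        obtain ⟨a, rest, hcons⟩ := List.exists_cons_of_ne_nil hne'
        have ha := dropWhile_head_not _ _ _ _ hcons
        simp at ha
        rw [hcons, ha]
        exact ⟨rest, rfl⟩
      exact hmin1 m (by omega) hx_at_m
    have htm'' : t = m := le_antisymm htm' htm
    rw [htm''] at hp3
    rw [hdrop] at hp3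
    obtain ⟨r, hr⟩ := hp3
    rw [← hr]
    simp [List.takeWhile]
    omega
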